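-- pv_equiv track=rewrite | github.com/ProgmanZ/Modul-16.4-Tasks-HW- | Task-03.py | f_list
-- ===== SOURCE A (Python) =====
-- def f_list(search_part, db_list):
--     # Функция создает временный список из нулевых элементов входящего - основного списка db_shop.
--     # Возвращает количество искомых запчастей, сумму стоимости этих запчастей
--     temp_list = []
--     count_part = 0
--     cost = 0
--
--     for cell in db_list:
--         temp_list.append(cell[0])
--     count_part = temp_list.count(search_part)
--
--     for element in db_list:
--         if search_part == element[0]:
--             cost += element[1]
--
--     return count_part, cost
-- ===== SOURCE B (Python) =====
-- def f_list(search_part, db_list):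
--     count_part = 0
--     cost = 0
--     for element in db_list:
--         if element[0] == search_part:
--             count_part += 1
--             cost += element[1]
--     return count_part, cost
-- ===== Notes on version B (the rewrite author's own statement) =====
-- stated objective: simpler
-- what changed: Replaced A's build-a-temp-list-of-keys + .count plus a separate summing loop with a single pass that accumulates both the count and the cost at once.
import Mathlib
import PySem

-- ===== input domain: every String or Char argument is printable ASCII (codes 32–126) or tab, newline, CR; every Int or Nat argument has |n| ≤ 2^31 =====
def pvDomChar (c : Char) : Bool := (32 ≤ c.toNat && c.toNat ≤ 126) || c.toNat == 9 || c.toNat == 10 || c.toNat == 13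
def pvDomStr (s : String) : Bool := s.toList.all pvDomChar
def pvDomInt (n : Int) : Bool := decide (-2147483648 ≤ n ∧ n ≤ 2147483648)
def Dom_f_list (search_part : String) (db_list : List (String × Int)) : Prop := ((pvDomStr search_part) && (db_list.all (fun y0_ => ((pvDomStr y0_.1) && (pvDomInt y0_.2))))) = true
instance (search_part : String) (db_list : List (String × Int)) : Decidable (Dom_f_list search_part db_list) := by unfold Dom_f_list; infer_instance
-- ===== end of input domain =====

-- B replaces A's temp-list-of-keys + .count plus a second summing loop with one pass accumulating both count and cost (objective: simpler).

-- ===== PORT A =====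
def f_list (search_part : String) (db_list : List (String × Int)) : Int × Int :=
  let temp_list : List String := db_list.foldl (fun acc cell => acc ++ [cell.1]) []
  let count_part : Int := PySem.List.count temp_list search_part
  let cost : Int := db_list.foldl (fun cost element => if search_part == element.1 then cost + element.2 else cost) 0
  (count_part, cost)

-- ===== PORT B =====
def f_list_alt (search_part : String) (db_list : List (String × Int)) : Int × Int :=
  db_list.foldl (fun (acc : Int × Int) element =>
    if element.1 == search_part then (acc.1 + 1, acc.2 + element.2) else acc) (0, 0)

-- ===== PRECONDITION & SPEC =====
def Spec_f_list (search_part : String) (db_list : List (String × Int)) (out : Int × Int) : Prop := out = f_list_alt search_part db_list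
instance (search_part : String) (db_list : List (String × Int)) (out : Int × Int) : Decidable (Spec_f_list search_part db_list out) := by unfold Spec_f_list; infer_instance

-- ===== CLAIM (what is proved, stated in full; the proofs are below) =====
def Claim_equal_f_list : Prop := ∀ (search_part : String) (db_list : List (String × Int)), Dom_f_list search_part db_list → Spec_f_list search_part db_list (f_list search_part db_list)

-- ===== LEMMAS AND PROOFS =====

-- ===== VERDICT (by name: the statement is the Claim_ definition above) =====
theorem f_list_spec : Claim_equal_f_list := by
  intro search_part db_list _
  unfold Spec_f_list f_list f_list_alt
  dsimp only
  rw [PySem.List.foldl_congr_mem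
      (f := fun (acc : Int × Int) element =>
        if element.1 == search_part then (acc.1 + 1, acc.2 + element.2) else acc)
      (g := fun (acc : Int × Int) element =>
        (if element.1 == search_part then acc.1 + 1 else acc.1,
         if search_part == element.1 then acc.2 + element.2 else acc.2))
      (l := db_list) (init := ((0 : Int), (0 : Int)))
      (by intro acc x _; by_cases h : x.1 = search_part <;> simp [h, Ne.symm])]
  rw [PySem.List.foldl_prod_mk
      (fun (acc : Int) (element : String × Int) => if element.1 == search_part then acc + 1 else acc)
      (fun (acc : Int) (element : String × Int) => if search_part == element.1 then acc + element.2 else acc)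
      db_list 0 0]
  rw [PySem.List.foldl_append_singleton_eq_map]
  congr 1
  rw [PySem.List.foldl_if_add_one]
  simp [PySem.List.count, List.count_eq_countP, List.countP_map, Function.comp_def]
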